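-- pv_equiv track=rewrite | github.com/sean-francis113/Chronicler_DiscordBot | lib/symbol.py | pluckSymbols
-- ===== SOURCE A (Python) =====
-- def pluckSymbols(string, start, end, removeInside=True):
-- 		"""
-- 		Functions That Pulls the Symbols from the String
--
-- 		Parameters:
-- 		-----------
-- 				client (discord.Client)
-- 						The Chronicler Client
-- 				message (discord.Message)
-- 						The Message That Held the Command
-- 		"""
--
-- 		strToEdit = string
-- 		startIndex = strToEdit.find(start)
--
-- 		if startIndex > -1:
-- 				endIndex = strToEdit.find(end)
-- 				if endIndex > startIndex:
-- 						if removeInside == True: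
-- 								strToEdit = strToEdit[:startIndex] + strToEdit[
--                     (endIndex + len(end)):]
-- 						else:
-- 								strToEdit = strToEdit[:startIndex] + strToEdit[
--                     (startIndex + len(start)):endIndex] + strToEdit[
--                         (endIndex + len(end)):]
-- 						strToEdit = pluckSymbols(' '.join(strToEdit.split()), start, end)
-- 		return strToEdit
-- ===== SOURCE B (Python) =====
-- def pluckSymbols(string, start, end, removeInside=True):
--     # iterative re-decomposition: guard-style early returns for the first pass
--     # (the only one that honours the caller's removeInside), then a plain loop
--     # in which every pass removes the inside.
--     i = string.find(start)
--     if i <= -1: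
--         return string
--     j = string.find(end)
--     if j <= i:
--         return string
--     if removeInside:
--         cur = string[:i] + string[j + len(end):]
--     else:
--         cur = string[:i] + string[i + len(start):j] + string[j + len(end):]
--     cur = ' '.join(cur.split())
--     while True:
--         i = cur.find(start)
--         if i <= -1:
--             break
--         j = cur.find(end)
--         if j <= i:
--             break
--         cur = ' '.join((cur[:i] + cur[j + len(end):]).split())
--     return cur
-- ===== Notes on version B (the rewrite author's own statement) =====
-- stated objective: alternative
-- what changed: A's tail recursion (re-calling itself with the default removeInside=True after each removal) is re-decomposed as guard-style early returns for the first pass followed by an explicit while loop over a current-string variable in which every pass removes the inside.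
import Mathlib
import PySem

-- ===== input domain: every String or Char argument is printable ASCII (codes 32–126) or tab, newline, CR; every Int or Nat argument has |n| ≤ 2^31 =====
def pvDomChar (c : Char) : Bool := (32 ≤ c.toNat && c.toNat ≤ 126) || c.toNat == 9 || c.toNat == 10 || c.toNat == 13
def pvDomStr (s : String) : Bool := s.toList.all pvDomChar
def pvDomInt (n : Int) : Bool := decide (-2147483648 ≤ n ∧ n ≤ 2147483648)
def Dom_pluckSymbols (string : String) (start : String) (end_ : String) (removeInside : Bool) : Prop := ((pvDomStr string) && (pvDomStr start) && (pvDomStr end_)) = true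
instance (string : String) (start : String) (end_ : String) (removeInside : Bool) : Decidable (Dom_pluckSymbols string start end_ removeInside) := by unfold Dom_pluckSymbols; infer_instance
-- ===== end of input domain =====

-- B rewrites A's tail recursion as guard-style early returns plus an explicit while loop
-- (all passes after the first always remove the inside); same return value, objective: alternative.

-- ===== PORT A =====
-- A's tail recursion, fuel-guarded (fuel only makes the recursion structural; every
-- successful pass strictly shortens the string, so string.length + 1 is never exhausted).
def pluckGoA (fuel : Nat) (s start end_ : List Char) (removeInside : Bool) : List Char :=
  match fuel with
  | 0 => s
  | fuel + 1 =>
    let startIndex := PySem.Chars.find s start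
    if startIndex > -1 then
      let endIndex := PySem.Chars.find s end_
      if endIndex > startIndex then
        let s' :=
          if removeInside == true then
            PySem.Chars.slice s none (some startIndex) ++
              PySem.Chars.slice s (some (endIndex + (end_.length : Int))) none
          else
            PySem.Chars.slice s none (some startIndex) ++
              PySem.Chars.slice s (some (startIndex + (start.length : Int))) (some endIndex) ++
              PySem.Chars.slice s (some (endIndex + (end_.length : Int))) none
        pluckGoA fuel (PySem.Chars.join [' '] (PySem.Chars.split₀ s')) start end_ true
      else s
    else s

def pluckSymbols (string : String) (start : String) (end_ : String) (removeInside : Bool) : String :=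
  String.ofList (pluckGoA (string.toList.length + 1) string.toList start.toList end_.toList removeInside)

-- ===== PORT B =====
-- B's while loop (every pass removes the inside), fuel-guarded like A's recursion.
def pluckLoopB (fuel : Nat) (cur start end_ : List Char) : List Char :=
  match fuel with
  | 0 => cur
  | fuel + 1 =>
    let i := PySem.Chars.find cur start
    if i ≤ -1 then cur
    else
      let j := PySem.Chars.find cur end_
      if j ≤ i then cur
      else
        pluckLoopB fuel
          (PySem.Chars.join [' '] (PySem.Chars.split₀
            (PySem.Chars.slice cur none (some i) ++
              PySem.Chars.slice cur (some (j + (end_.length : Int))) none)))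
          start end_

def pluckSymbols_alt (string : String) (start : String) (end_ : String) (removeInside : Bool) : String :=
  let s := string.toList
  let st := start.toList
  let en := end_.toList
  let i := PySem.Chars.find s st
  if i ≤ -1 then string
  else
    let j := PySem.Chars.find s en
    if j ≤ i then string
    else
      let cur0 :=
        if removeInside then
          PySem.Chars.slice s none (some i) ++
            PySem.Chars.slice s (some (j + (en.length : Int))) none
        else
          PySem.Chars.slice s none (some i) ++
            PySem.Chars.slice s (some (i + (st.length : Int))) (some j) ++
            PySem.Chars.slice s (some (j + (en.length : Int))) none
      let cur := PySem.Chars.join [' '] (PySem.Chars.split₀ cur0)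
      String.ofList (pluckLoopB s.length cur st en)

-- ===== PRECONDITION & SPEC =====
def Spec_pluckSymbols (string : String) (start : String) (end_ : String) (removeInside : Bool) (out : String) : Prop := out = pluckSymbols_alt string start end_ removeInside
instance (string : String) (start : String) (end_ : String) (removeInside : Bool) (out : String) : Decidable (Spec_pluckSymbols string start end_ removeInside out) := by unfold Spec_pluckSymbols; infer_instance

-- ===== CLAIM (what is proved, stated in full; the proofs are below) =====
def Claim_equal_pluckSymbols : Prop := ∀ (string : String) (start : String) (end_ : String) (removeInside : Bool), Dom_pluckSymbols string start end_ removeInside → Spec_pluckSymbols string start end_ removeInside (pluckSymbols string start end_ removeInside)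

-- ===== LEMMAS AND PROOFS =====

-- With removeInside = true, A's recursion and B's loop take identical steps.
theorem goA_eq_loopB (st en : List Char) :
    ∀ (fuel : Nat) (s : List Char), pluckGoA fuel s st en true = pluckLoopB fuel s st en := by
  intro fuel
  induction fuel with
  | zero => intro s; rfl
  | succ n ih =>
    intro s
    simp only [pluckGoA, pluckLoopB]
    by_cases h1 : PySem.Chars.find s st > -1
    · by_cases h2 : PySem.Chars.find s en > PySem.Chars.find s st
      · have h1' : ¬ PySem.Chars.find s st ≤ -1 := by omega
        have h2' : ¬ PySem.Chars.find s en ≤ PySem.Chars.find s st := by omega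
        simp [h1, h2, h1', h2', ih]
      · have h2' : PySem.Chars.find s en ≤ PySem.Chars.find s st := by omega
        simp [h1, h2, h2']
    · have h1' : PySem.Chars.find s st ≤ -1 := by omega
      simp [h1, h1']

-- ===== VERDICT (by name: the statement is the Claim_ definition above) =====
theorem pluckSymbols_spec : Claim_equal_pluckSymbols := by
  intro string start end_ removeInside _
  unfold Spec_pluckSymbols pluckSymbols pluckSymbols_alt
  simp only [pluckGoA]
  by_cases h1 : PySem.Chars.find string.toList start.toList > -1
  · by_cases h2 : PySem.Chars.find string.toList end_.toList > PySem.Chars.find string.toList start.toList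
    · have h1' : ¬ PySem.Chars.find string.toList start.toList ≤ -1 := by omega
      have h2' : ¬ PySem.Chars.find string.toList end_.toList ≤ PySem.Chars.find string.toList start.toList := by omega
      cases removeInside <;> simp [h1, h2, h1', h2', goA_eq_loopB]
    · have h2' : PySem.Chars.find string.toList end_.toList ≤ PySem.Chars.find string.toList start.toList := by omega
      simp [h1, h2, h2', String.ofList_toList]
  · have h1' : PySem.Chars.find string.toList start.toList ≤ -1 := by omega
    simp [h1, h1', String.ofList_toList]
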